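-- pv_equiv track=rewrite | github.com/SamlKeller/CS | Python/Unit 3/Red/red1.py | replace_after
-- ===== SOURCE A (Python) =====
-- def replace_after (string):
--     vowels = ['A', 'E', 'I', 'O', 'U', 'Y'] # Should y always be a vowel?
--     string = list(string)
--     lastChar = ''
--     for index, char in enumerate(string):
--         if (lastChar.upper() in vowels):
--             string[index] = '!'
--         lastChar = char
--     return "".join(str(x) for x in string)
-- ===== SOURCE B (Python) =====
-- import re
--
-- def replace_after(string):
--     # Single regex substitution: any character (DOTALL, so newlines too) that is
--     # preceded by a vowel (either case, matching A's .upper() test) becomes '!'.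
--     # Zero-width lookbehind keeps matches anchored to original positions, so
--     # consecutive vowels chain exactly as in the index-based loop.
--     return re.sub(r'(?<=[AEIOUYaeiouy]).', '!', string, flags=re.DOTALL)
-- ===== Notes on version B (the rewrite author's own statement) =====
-- stated objective: idiomatic
-- what changed: Replaces A's list-mutating enumerate loop with lastChar state by a single regex substitution: re.sub with a zero-width vowel lookbehind rewrites each character that follows a vowel to an exclamation mark (runs in the C regex engine, hence the measured constant-factor speedup).
import Mathlib
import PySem

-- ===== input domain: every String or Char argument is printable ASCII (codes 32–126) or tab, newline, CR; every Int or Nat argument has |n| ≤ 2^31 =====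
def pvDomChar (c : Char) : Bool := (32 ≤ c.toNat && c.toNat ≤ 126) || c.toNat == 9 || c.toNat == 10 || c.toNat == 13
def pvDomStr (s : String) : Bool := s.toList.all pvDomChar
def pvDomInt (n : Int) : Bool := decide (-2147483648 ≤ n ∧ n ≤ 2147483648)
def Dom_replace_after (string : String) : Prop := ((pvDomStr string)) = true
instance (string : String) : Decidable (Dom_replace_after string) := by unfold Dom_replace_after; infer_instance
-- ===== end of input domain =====

-- B replaces A's list-mutating loop with lastChar state by a single regex
-- substitution (vowel lookbehind); objective: idiomatic, same O(n) cost.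

-- ===== PORT A =====
def pvVowelsA : List String := ["A", "E", "I", "O", "U", "Y"]

-- A's for-loop over enumerate: state is (emitted head, lastChar);
-- 'string[index] = '!'' becomes emitting '!' at that position (the original
-- char at the index is still what enumerate yields and what lastChar becomes).
def pvLoopA : List Char → String → List Char
  | [], _ => []
  | c :: rest, lastChar =>
      (if pvVowelsA.contains (PySem.Str.upper lastChar) then '!' else c)
        :: pvLoopA rest (String.ofList [c])

def replace_after (string : String) : String :=
  String.ofList (pvLoopA string.toList "")

-- ===== PORT B =====
-- hand port of re.sub(r'(?<=[AEIOUYaeiouy]).', '!', s, flags=re.DOTALL):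
-- the regex engine scans positions left to right; at position i the pattern
-- matches iff the lookbehind holds (i ≥ 1 and s[i-1] in the class) — '.' with
-- DOTALL matches any character — and the matched character is replaced by '!'.
-- Exact for this fixed pattern: every match has length 1, so the scan advances
-- one position per step whether or not it matched.
def pvClassB : List Char := "AEIOUYaeiouy".toList

def pvSubScan (s : List Char) (i : Nat) : List Char :=
  if h : i < s.length then
    (if 1 ≤ i && pvClassB.contains s[i-1] then '!' else s[i]) :: pvSubScan s (i+1)
  else []
termination_by s.length - i

def replace_after_alt (string : String) : String :=
  String.ofList (pvSubScan string.toList 0)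

-- ===== PRECONDITION & SPEC =====
def Spec_replace_after (string : String) (out : String) : Prop := out = replace_after_alt string
instance (string : String) (out : String) : Decidable (Spec_replace_after string out) := by unfold Spec_replace_after; infer_instance

-- ===== CLAIM (what is proved, stated in full; the proofs are below) =====
def Claim_equal_replace_after : Prop := ∀ (string : String), Dom_replace_after string → Spec_replace_after string (replace_after string)

-- ===== LEMMAS AND PROOFS =====

-- the vowel tests of the two ports agree on every single character
theorem pv_vowel_char (c : Char) :
    pvVowelsA.contains (PySem.Str.upper (String.ofList [c]))
      = pvClassB.contains c := by
  simp only [pvVowelsA, pvClassB]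
  simp only [PySem.Str.upper, String.toList_ofList, PySem.Chars.upper, List.map,
    PySem.Chars.upperChar, PySem.Chars.islower,
    show ("A":String) = String.ofList ['A'] from rfl,
    show ("E":String) = String.ofList ['E'] from rfl,
    show ("I":String) = String.ofList ['I'] from rfl,
    show ("O":String) = String.ofList ['O'] from rfl,
    show ("U":String) = String.ofList ['U'] from rfl,
    show ("Y":String) = String.ofList ['Y'] from rfl,
    show ("AEIOUYaeiouy".toList) = ['A','E','I','O','U','Y','a','e','i','o','u','y'] from rfl,
    List.contains_cons, List.contains_nil, Bool.or_false]
  rw [Bool.eq_iff_iff]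
  simp only [Bool.or_eq_true, beq_iff_eq, String.ofList_inj, List.cons.injEq, and_true]
  have hle : ∀ a b : Char, (a ≤ b) ↔ a.toNat ≤ b.toNat := by
    intro a b
    rw [Char.le_def, UInt32.le_iff_toNat_le]; rfl
  have hlt : ∀ a b : Char, (a < b) ↔ a.toNat < b.toNat := by
    intro a b
    rw [Char.lt_def, UInt32.lt_iff_toNat_lt]; rfl
  have hinj : ∀ a b : Char, (a = b) ↔ a.toNat = b.toNat := by
    intro a b
    exact ⟨fun h => h ▸ rfl, fun h => Char.ext (UInt32.toNat_inj.mp h)⟩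
  split_ifs with h
  · simp only [Bool.and_eq_true, decide_eq_true_eq] at h
    have hn : 97 ≤ c.toNat ∧ c.toNat ≤ 122 := by
      obtain ⟨h1, h2⟩ := h
      rw [hle] at h1 h2
      exact ⟨h1, h2⟩
    have hv : (Char.ofNat (c.toNat - 32)).toNat = c.toNat - 32 := by
      rw [Char.toNat_ofNat, if_pos]
      exact Or.inl (by omega)
    simp only [hinj, hv]
    simp only [show 'A'.toNat = 65 from rfl, show 'E'.toNat = 69 from rfl,
      show 'I'.toNat = 73 from rfl, show 'O'.toNat = 79 from rfl,
      show 'U'.toNat = 85 from rfl, show 'Y'.toNat = 89 from rfl,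
      show 'a'.toNat = 97 from rfl, show 'e'.toNat = 101 from rfl,
      show 'i'.toNat = 105 from rfl, show 'o'.toNat = 111 from rfl,
      show 'u'.toNat = 117 from rfl, show 'y'.toNat = 121 from rfl]
    omega
  · simp only [Bool.and_eq_true, decide_eq_true_eq, not_and, not_le] at h
    simp only [hle, hlt] at h
    simp only [hinj]
    simp only [show 'A'.toNat = 65 from rfl, show 'E'.toNat = 69 from rfl,
      show 'I'.toNat = 73 from rfl, show 'O'.toNat = 79 from rfl,
      show 'U'.toNat = 85 from rfl, show 'Y'.toNat = 89 from rfl,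
      show 'a'.toNat = 97 from rfl, show 'e'.toNat = 101 from rfl,
      show 'i'.toNat = 105 from rfl, show 'o'.toNat = 111 from rfl,
      show 'u'.toNat = 117 from rfl, show 'y'.toNat = 121 from rfl,
      show 'z'.toNat = 122 from rfl] at *
    omega

-- from position 1 on, B's index scan with lookback equals A's lastChar loop
theorem pv_scan_eq_loop (s : List Char) : ∀ i, 1 ≤ i → i ≤ s.length →
    pvSubScan s i = pvLoopA (s.drop i) (String.ofList [s[i-1]!]) := by
  intro i h1 h2
  induction hn : s.length - i generalizing i with
  | zero =>
      have : i = s.length := by omega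
      subst this
      rw [pvSubScan, dif_neg (by omega)]
      simp [pvLoopA]
  | succ n ih =>
      have hlt : i < s.length := by omega
      rw [pvSubScan, dif_pos hlt]
      rw [List.drop_eq_getElem_cons hlt]
      simp only [pvLoopA]
      rw [ih (i+1) (by omega) (by omega) (by omega)]
      have hprev : s[i-1]! = s[i-1]'(by omega) := by
        simp [List.getElem!_eq_getElem?_getD, List.getElem?_eq_getElem (by omega : i-1 < s.length)]
      have hcur : s[i+1-1]! = s[i]'hlt := by
        simp [List.getElem!_eq_getElem?_getD, show i+1-1 = i from rfl,
          List.getElem?_eq_getElem hlt]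
      rw [hprev, hcur, pv_vowel_char]
      have : (1 ≤ i) = True := by simp [h1]
      simp [this]

-- ===== VERDICT (by name: the statement is the Claim_ definition above) =====
theorem replace_after_spec : Claim_equal_replace_after := by
  intro s _
  unfold Spec_replace_after replace_after replace_after_alt
  cases h : s.toList with
  | nil => simp [pvLoopA, pvSubScan]
  | cons c rest =>
      rw [pvSubScan, dif_pos (by simp)]
      rw [pv_scan_eq_loop _ 1 le_rfl (by simp)]
      simp only [pvLoopA]
      norm_num [pvVowelsA, PySem.Str.upper, PySem.Chars.upper]
      simp
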